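-- pv_equiv track=rewrite | github.com/lukh/mopidy-transistor | mopidy_redbox/frontend.py | find_closest_playable
-- ===== SOURCE A (Python) =====
-- def find_closest_playable(raw_pos, positions, margin=3 ):
--     def distance(val, target):
--         return abs(val-target)
--
--     valid_positions = [p for p in positions if distance(raw_pos, p) <= margin]
--     if len(valid_positions) == 1:
--         return valid_positions[0]
--     elif len(valid_positions) > 1:
--         pos_sorted = sorted(valid_positions, key=lambda pos: distance(raw_pos, pos))
--         return pos_sorted[0]
--
--     return None
-- ===== SOURCE B (Python) =====
-- def find_closest_playable(raw_pos, positions, margin=3):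
--     best = None
--     best_dist = None
--     for p in positions:
--         d = abs(raw_pos - p)
--         if d > margin:
--             continue
--         if best is None or d < best_dist:
--             best = p
--             best_dist = d
--     return best
-- ===== Notes on version B (the rewrite author's own statement) =====
-- stated objective: simpler
-- what changed: Replaces A's build-filtered-list, length-case-split and sorted()[0] with a single linear scan keeping the first position of minimal distance within margin.
import Mathlib
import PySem

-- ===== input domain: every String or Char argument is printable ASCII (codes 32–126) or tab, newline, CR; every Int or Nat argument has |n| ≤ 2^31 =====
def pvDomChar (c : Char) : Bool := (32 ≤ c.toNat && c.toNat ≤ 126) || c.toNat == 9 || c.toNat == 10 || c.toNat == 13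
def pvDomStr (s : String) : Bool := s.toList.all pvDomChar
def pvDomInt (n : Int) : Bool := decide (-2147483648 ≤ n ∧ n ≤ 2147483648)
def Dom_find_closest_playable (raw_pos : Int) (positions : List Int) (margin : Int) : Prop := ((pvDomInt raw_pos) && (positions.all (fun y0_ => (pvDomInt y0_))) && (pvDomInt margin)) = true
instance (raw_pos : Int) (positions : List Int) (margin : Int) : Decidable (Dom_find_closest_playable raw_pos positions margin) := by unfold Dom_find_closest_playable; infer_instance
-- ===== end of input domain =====

-- B replaces A's build-filtered-list / length-case-split / full stable sort with a single
-- linear first-minimum scan (simpler, one pass); return values are proved identical everywhere.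

-- ===== PORT A =====
-- literal port: filter by distance, then branch on the filtered length, sorting when > 1
def find_closest_playable (raw_pos : Int) (positions : List Int) (margin : Int) : Option Int :=
  let valid := positions.filter (fun p => decide (|raw_pos - p| ≤ margin))
  if valid.length = 1 then
    PySem.List.pyGet? valid 0
  else if valid.length > 1 then
    PySem.List.pyGet? (PySem.List.sorted valid (fun pos => |raw_pos - pos|)) 0
  else
    none

-- ===== PORT B =====
-- one fold over positions keeping (best, best_dist); strict '<' keeps the first minimum
def pvScanStep (raw_pos margin : Int) (st : Option (Int × Int)) (p : Int) : Option (Int × Int) :=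
  let d := |raw_pos - p|
  if d > margin then st
  else
    match st with
    | none => some (p, d)
    | some (b, bd) => if d < bd then some (p, d) else some (b, bd)

def find_closest_playable_alt (raw_pos : Int) (positions : List Int) (margin : Int) : Option Int :=
  (positions.foldl (pvScanStep raw_pos margin) none).map Prod.fst

-- ===== PRECONDITION & SPEC =====
def Spec_find_closest_playable (raw_pos : Int) (positions : List Int) (margin : Int) (out : Option Int) : Prop := out = find_closest_playable_alt raw_pos positions margin
instance (raw_pos : Int) (positions : List Int) (margin : Int) (out : Option Int) : Decidable (Spec_find_closest_playable raw_pos positions margin out) := by unfold Spec_find_closest_playable; infer_instance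

-- ===== CLAIM (what is proved, stated in full; the proofs are below) =====
def Claim_equal_find_closest_playable : Prop := ∀ (raw_pos : Int) (positions : List Int) (margin : Int), Dom_find_closest_playable raw_pos positions margin → Spec_find_closest_playable raw_pos positions margin (find_closest_playable raw_pos positions margin)

-- ===== LEMMAS AND PROOFS =====

-- the scan step on an in-margin element, with the distance recomputed
def pvMinStep (raw_pos : Int) (st : Option (Int × Int)) (p : Int) : Option (Int × Int) :=
  match st with
  | none => some (p, |raw_pos - p|)
  | some (b, bd) => if |raw_pos - p| < bd then some (p, |raw_pos - p|) else some (b, bd)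

lemma scan_eq_filter_fold (raw_pos margin : Int) (l : List Int) :
    l.foldl (pvScanStep raw_pos margin) none
      = (l.filter (fun p => decide (|raw_pos - p| ≤ margin))).foldl (pvMinStep raw_pos) none := by
  rw [← PySem.List.foldl_if_eq_foldl_filter]
  apply PySem.List.foldl_congr_mem
  intro acc x _
  simp only [pvScanStep, pvMinStep]
  by_cases h : |raw_pos - x| ≤ margin
  · simp [h, not_lt.mpr h]
  · simp [h, lt_of_not_ge h]

lemma head?_insertBy {α : Type} (before : α → α → Bool) (x : α) (ys : List α) :
    (PySem.List.insertBy before x ys).head?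
      = some (match ys with | [] => x | y :: _ => if before x y then x else y) := by
  cases ys with
  | nil => simp [PySem.List.insertBy]
  | cons y t =>
      by_cases h : before x y
      · simp [PySem.List.insertBy, h]
      · simp [PySem.List.insertBy, h]

lemma minFold_eq_sorted_head (raw_pos : Int) (l : List Int) :
    l.foldl (pvMinStep raw_pos) none
      = (PySem.List.sorted l (fun p => |raw_pos - p|)).head?.map (fun m => (m, |raw_pos - m|)) := by
  induction l using List.reverseRecOn with
  | nil => simp [PySem.List.sorted_eq_foldl_insertBy]
  | append_singleton t x ih =>
      rw [List.foldl_append, List.foldl_cons, List.foldl_nil, ih,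
        PySem.List.sorted_eq_foldl_insertBy (t ++ [x]), List.foldl_append,
        List.foldl_cons, List.foldl_nil, ← PySem.List.sorted_eq_foldl_insertBy t,
        head?_insertBy]
      cases hs : PySem.List.sorted t (fun p => |raw_pos - p|) with
      | nil => simp [pvMinStep]
      | cons m rest =>
          by_cases h : |raw_pos - x| < |raw_pos - m|
          · simp [pvMinStep, h]
          · simp [pvMinStep, h]

lemma pyGet?_zero_eq_head? {α : Type} (xs : List α) : PySem.List.pyGet? xs 0 = xs.head? := by
  cases xs <;> simp [PySem.List.pyGet?, PySem.List.pyIdx?]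

lemma alt_eq_sorted_head (raw_pos : Int) (positions : List Int) (margin : Int) :
    find_closest_playable_alt raw_pos positions margin
      = (PySem.List.sorted (positions.filter (fun p => decide (|raw_pos - p| ≤ margin)))
          (fun p => |raw_pos - p|)).head? := by
  unfold find_closest_playable_alt
  rw [scan_eq_filter_fold, minFold_eq_sorted_head]
  cases (PySem.List.sorted (positions.filter (fun p => decide (|raw_pos - p| ≤ margin)))
          (fun p => |raw_pos - p|)).head? <;> simp

-- ===== VERDICT (by name: the statement is the Claim_ definition above) =====
theorem find_closest_playable_spec : Claim_equal_find_closest_playable := by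
  intro raw_pos positions margin _
  unfold Spec_find_closest_playable find_closest_playable
  rw [alt_eq_sorted_head]
  set valid := positions.filter (fun p => decide (|raw_pos - p| ≤ margin)) with hv
  by_cases h1 : valid.length = 1
  · -- singleton: sorted of a singleton is itself
    match hval : valid, h1 with
    | [v], _ =>
        rw [PySem.List.sorted_eq_self_of_pairwise [v] _ (by simp)]
        simp
  · by_cases h2 : valid.length > 1
    · simp [h1, h2, pyGet?_zero_eq_head?]
    · have h0 : valid.length = 0 := by omega
      have : valid = [] := List.length_eq_zero_iff.mp h0
      simp [this, PySem.List.sorted_eq_foldl_insertBy]
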